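-- pv_equiv track=rewrite | github.com/kiantest1024/functionalAIcases | functional_ai/strict_ai_generator.py | _extract_balanced_json_container
-- ===== SOURCE A (Python) =====
-- from typing import List, Dict, Any, Optional, Callable
--
-- def _extract_balanced_json_container(text: str) -> Optional[str]:
--     """
--     截取第一个与 [...] 或 {...} 平衡的 JSON 片段，字符串内的 [ ] { } 不计入。
--     避免用 rfind(']') 时误把 expected 里的列表（如 [0.5, 1, 2, 1000]）当成数组结尾而截断。
--     """
--     start = -1
--     for i, c in enumerate(text):
--         if c in "[{":
--             start = i
--             break
--     if start < 0:
--         return None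
--     stack: List[str] = []
--     pair = {"[": "]", "{": "}"}
--     in_string = False
--     escape_next = False
--     n = len(text)
--     i = start
--     while i < n:
--         c = text[i]
--         if in_string:
--             if escape_next:
--                 escape_next = False
--             elif c == "\\":
--                 escape_next = True
--             elif c == '"':
--                 in_string = False
--             i += 1
--             continue
--         if c == '"':
--             in_string = True
--             i += 1
--             continue
--         if c in "[{":
--             stack.append(pair[c])
--         elif c in "}]":
--             if not stack or stack[-1] != c:
--                 return None
--             stack.pop()
--             if not stack:
--                 return text[start : i + 1]
--         i += 1
--     return None
-- ===== SOURCE B (Python) =====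
-- from typing import Optional
--
--
-- def _skip_string(text: str, j: int) -> Optional[int]:
--     """j is just past the opening quote; return index just past the closing quote, or None."""
--     n = len(text)
--     while j < n:
--         c = text[j]
--         if c == "\\":
--             j += 2
--         elif c == '"':
--             return j + 1
--         else:
--             j += 1
--     return None
--
--
-- def _parse(text: str, closer: str, j: int) -> Optional[int]:
--     """j is just past an opener whose matching closer is `closer`; return index just
--     past that closer, or None on a type-mismatched closer / unterminated input."""
--     n = len(text)
--     while j < n:
--         c = text[j]
--         if c == '"':
--             j = _skip_string(text, j + 1)
--             if j is None:
--                 return None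
--         elif c == closer:
--             return j + 1
--         elif c in "}]":
--             return None
--         elif c == "[":
--             j = _parse(text, "]", j + 1)
--             if j is None:
--                 return None
--         elif c == "{":
--             j = _parse(text, "}", j + 1)
--             if j is None:
--                 return None
--         else:
--             j += 1
--     return None
--
--
-- def _extract_balanced_json_container(text: str) -> Optional[str]:
--     for i, c in enumerate(text):
--         if c == "[":
--             end = _parse(text, "]", i + 1)
--             return None if end is None else text[i:end]
--         if c == "{":
--             end = _parse(text, "}", i + 1)
--             return None if end is None else text[i:end]
--     return None
-- ===== Notes on version B (the rewrite author's own statement) =====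
-- stated objective: alternative
-- what changed: Replaced the explicit stack of expected closers plus string/escape flags in one flat while-loop by a recursive-descent parser: a helper _parse(closer, j) that skips strings via _skip_string and recurses into nested containers, the call stack replacing the explicit stack.
import Mathlib
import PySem

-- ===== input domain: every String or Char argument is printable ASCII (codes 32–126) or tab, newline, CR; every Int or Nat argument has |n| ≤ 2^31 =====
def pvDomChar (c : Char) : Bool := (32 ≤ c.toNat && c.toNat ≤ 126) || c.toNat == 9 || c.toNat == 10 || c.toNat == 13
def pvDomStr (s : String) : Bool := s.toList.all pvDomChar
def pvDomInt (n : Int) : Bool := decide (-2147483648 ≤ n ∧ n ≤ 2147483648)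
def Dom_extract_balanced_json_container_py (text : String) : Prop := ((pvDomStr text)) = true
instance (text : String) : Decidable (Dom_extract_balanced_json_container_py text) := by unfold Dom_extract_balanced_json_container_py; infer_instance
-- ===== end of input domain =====

-- B replaces A's explicit stack of expected closers with a recursive-descent parser
-- (the call stack holds the nesting); same cost, alternative decomposition.

-- text[a:b] for 0 ≤ a ≤ b ≤ length (the only way either port slices); exact Python slice there.
def pvSlice (full : List Char) (a b : Nat) : String := String.ofList ((full.drop a).take (b - a))

-- ===== PORT A =====
-- the `for i, c in enumerate(text): if c in "[{": start = i; break` prescan;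
-- `none` = start stayed -1 (the `if start < 0: return None` check).
def aFind : List Char → Nat → Option Nat
  | [], _ => none
  | c :: rest, i => if c = '[' ∨ c = '{' then some i else aFind rest (i + 1)

-- A's while-loop, step for step: rem = text[i:], stack holds expected closers
-- (Python's stack top = our list head), in_string / escape_next flags.
def aLoop (full : List Char) (start i : Nat) (rem stack : List Char) (inS esc : Bool) :
    Option String :=
  match rem with
  | [] => none
  | c :: rest =>
    if inS then
      if esc then aLoop full start (i + 1) rest stack true false
      else if c = '\\' then aLoop full start (i + 1) rest stack true true
      else if c = '"' then aLoop full start (i + 1) rest stack false esc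
      else aLoop full start (i + 1) rest stack true esc
    else if c = '"' then aLoop full start (i + 1) rest stack true esc
    else if c = '[' ∨ c = '{' then
      aLoop full start (i + 1) rest ((if c = '[' then ']' else '}') :: stack) false esc
    else if c = '}' ∨ c = ']' then
      match stack with
      | [] => none
      | top :: stack' =>
        if top ≠ c then none
        else if stack' = [] then some (pvSlice full start (i + 1))
        else aLoop full start (i + 1) rest stack' false esc
    else aLoop full start (i + 1) rest stack false esc

def extract_balanced_json_container_py (text : String) : Option String :=
  let chars := text.toList
  match aFind chars 0 with
  | none => none
  | some start => aLoop chars start start (chars.drop start) [] false false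

-- ===== PORT B =====
-- Source B's _skip_string over the suffix after the opening quote; returns the suffix
-- after the closing quote (Source B returns the corresponding index). The subtype
-- length bound is Source B's "the scan consumed at least one character".
def skipB : (s : List Char) → Option { r : List Char // r.length < s.length }
  | [] => none
  | c :: rest =>
    if c = '\\' then
      match rest with
      | [] => none
      | _ :: rest' =>
        match skipB rest' with
        | none => none
        | some ⟨r, h⟩ => some ⟨r, by simp; omega⟩
    else if c = '"' then some ⟨rest, by simp⟩
    else
      match skipB rest with
      | none => none
      | some ⟨r, h⟩ => some ⟨r, by simp; omega⟩

-- Source B's _parse: s is the suffix just past an opener whose closer is `closer`;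
-- returns the suffix just past the matching closer, none on mismatch / end of text.
def parseB (closer : Char) : (s : List Char) → Option { r : List Char // r.length < s.length }
  | [] => none
  | c :: rest =>
    if c = '"' then
      match skipB rest with
      | none => none
      | some ⟨r, hr⟩ =>
        match parseB closer r with
        | none => none
        | some ⟨r', h'⟩ => some ⟨r', by simp at *; omega⟩
    else if c = closer then some ⟨rest, by simp⟩
    else if c = '}' ∨ c = ']' then none
    else if c = '[' then
      match parseB ']' rest with
      | none => none
      | some ⟨r, hr⟩ =>
        match parseB closer r with
        | none => none
        | some ⟨r', h'⟩ => some ⟨r', by simp at *; omega⟩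
    else if c = '{' then
      match parseB '}' rest with
      | none => none
      | some ⟨r, hr⟩ =>
        match parseB closer r with
        | none => none
        | some ⟨r', h'⟩ => some ⟨r', by simp at *; omega⟩
    else
      match parseB closer rest with
      | none => none
      | some ⟨r, h⟩ => some ⟨r, by simp; omega⟩
termination_by s => s.length
decreasing_by all_goals (simp at *; try omega)

-- Source B's main loop: first opener found launches _parse and slices text[i:end];
-- end index = full.length - r.length where r is the returned suffix.
def bFind (full : List Char) : List Char → Nat → Option String
  | [], _ => none
  | c :: rest, i =>
    if c = '[' then
      match parseB ']' rest with
      | none => none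
      | some ⟨r, _⟩ => some (pvSlice full i (full.length - r.length))
    else if c = '{' then
      match parseB '}' rest with
      | none => none
      | some ⟨r, _⟩ => some (pvSlice full i (full.length - r.length))
    else bFind full rest (i + 1)

def extract_balanced_json_container_py_alt (text : String) : Option String :=
  let chars := text.toList
  bFind chars chars 0

-- ===== PRECONDITION & SPEC =====
def Spec_extract_balanced_json_container_py (text : String) (out : Option String) : Prop := out = extract_balanced_json_container_py_alt text
instance (text : String) (out : Option String) : Decidable (Spec_extract_balanced_json_container_py text out) := by unfold Spec_extract_balanced_json_container_py; infer_instance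

-- ===== CLAIM (what is proved, stated in full; the proofs are below) =====
def Claim_equal_extract_balanced_json_container_py : Prop := ∀ (text : String), Dom_extract_balanced_json_container_py text → Spec_extract_balanced_json_container_py text (extract_balanced_json_container_py text)

-- ===== LEMMAS AND PROOFS =====

-- A's in-string scanning (from esc = false) is exactly skipB.
lemma aLoop_skip : ∀ (n : Nat) (rem : List Char), rem.length ≤ n →
    ∀ (full : List Char) (start i : Nat) (stack : List Char),
    aLoop full start i rem stack true false =
      match skipB rem with
      | none => none
      | some ⟨r, _⟩ => aLoop full start (i + (rem.length - r.length)) r stack false false := by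
  intro n
  induction n with
  | zero =>
    intro rem h full start i stack
    have : rem = [] := by cases rem <;> simp_all
    subst this; simp [aLoop, skipB]
  | succ n ih =>
    intro rem hlen full start i stack
    match rem with
    | [] => simp [aLoop, skipB]
    | c :: rest =>
      by_cases hb : c = '\\'
      · subst hb
        match rest with
        | [] => simp [aLoop, skipB]
        | d :: rest' =>
          rw [show aLoop full start i ('\\' :: d :: rest') stack true false =
              aLoop full start (i + 1 + 1) rest' stack true false from by
            simp [aLoop]]
          rw [ih rest' (by simp at hlen; omega)]
          conv_rhs => rw [skipB.eq_def]
          simp only [reduceIte]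
          cases hs : skipB rest' with
          | none => simp
          | some rp =>
            obtain ⟨r, hr⟩ := rp
            simp only
            congr 1
            simp; omega
      · by_cases hq : c = '"'
        · subst hq
          rw [show aLoop full start i ('"' :: rest) stack true false =
              aLoop full start (i + 1) rest stack false false from by
            simp [aLoop, hb]]
          conv_rhs => rw [skipB.eq_def]
          simp only [if_neg hb, reduceIte]
          congr 1
          simp
        · rw [show aLoop full start i (c :: rest) stack true false =
              aLoop full start (i + 1) rest stack true false from by
            simp [aLoop, hb, hq]]
          rw [ih rest (by simp at hlen; omega)]
          conv_rhs => rw [skipB.eq_def]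
          simp only [if_neg hb, if_neg hq]
          cases hs : skipB rest with
          | none => simp
          | some rp =>
            obtain ⟨r, hr⟩ := rp
            simp only
            congr 1
            simp; omega

-- A's loop with a nonempty stack of valid closers is the chain of parseB calls.
lemma aLoop_parse : ∀ (n : Nat) (s : List Char), s.length ≤ n →
    ∀ (full : List Char) (start i : Nat) (c1 : Char) (cs : List Char),
    (c1 = ']' ∨ c1 = '}') → (∀ x ∈ cs, x = ']' ∨ x = '}') →
    aLoop full start i s (c1 :: cs) false false =
      match parseB c1 s with
      | none => none
      | some ⟨r, _⟩ =>
        match cs with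
        | [] => some (pvSlice full start (i + (s.length - r.length)))
        | _ :: _ => aLoop full start (i + (s.length - r.length)) r cs false false := by
  intro n
  induction n with
  | zero =>
    intro s h full start i c1 cs _ _
    have : s = [] := by cases s <;> simp_all
    subst this; simp [aLoop, parseB]
  | succ n ih =>
    intro s hlen full start i c1 cs hc1 hcs
    match s with
    | [] => simp [aLoop, parseB]
    | c :: rest =>
      have hrest : rest.length ≤ n := by simp at hlen; omega
      by_cases hq : c = '"'
      · subst hq
        rw [show aLoop full start i ('"' :: rest) (c1 :: cs) false false =
            aLoop full start (i + 1) rest (c1 :: cs) true false from by simp [aLoop]]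
        rw [aLoop_skip rest.length rest le_rfl]
        conv_rhs => rw [parseB.eq_def]
        simp only
        cases hs : skipB rest with
        | none => simp
        | some rp =>
          obtain ⟨r, hr⟩ := rp
          simp only
          rw [ih r (by omega) full start _ c1 cs hc1 hcs]
          cases hp : parseB c1 r with
          | none => simp
          | some rp2 =>
            obtain ⟨r2, hr2⟩ := rp2
            simp only
            cases cs with
            | nil => simp only; congr 2; simp; omega
            | cons a as => simp only; congr 1; simp; omega
      · by_cases hop : c = '[' ∨ c = '{'
        · have hall : ∀ x ∈ c1 :: cs, x = ']' ∨ x = '}' := by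
            intro x hx; rcases List.mem_cons.mp hx with rfl | hx
            · exact hc1
            · exact hcs x hx
          have hc1q : ¬ (c = c1) := by
            rcases hop with rfl | rfl <;> rcases hc1 with rfl | rfl <;> simp
          rcases hop with rfl | rfl
          · rw [show aLoop full start i ('[' :: rest) (c1 :: cs) false false =
                aLoop full start (i + 1) rest (']' :: c1 :: cs) false false from by
              simp [aLoop]]
            rw [ih rest hrest full start (i + 1) ']' (c1 :: cs) (Or.inl rfl) hall]
            conv_rhs => rw [parseB.eq_def]
            simp only [if_neg hc1q, Char.reduceEq, or_self, if_false, if_true]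
            cases hp : parseB ']' rest with
            | none => simp
            | some rp =>
              obtain ⟨r, hr⟩ := rp
              simp only
              rw [ih r (by omega) full start _ c1 cs hc1 hcs]
              cases hp2 : parseB c1 r with
              | none => simp
              | some rp2 =>
                obtain ⟨r2, hr2⟩ := rp2
                simp only
                cases cs with
                | nil => simp only; congr 2; simp; omega
                | cons a as => simp only; congr 1; simp; omega
          · rw [show aLoop full start i ('{' :: rest) (c1 :: cs) false false =
                aLoop full start (i + 1) rest ('}' :: c1 :: cs) false false from by
              simp [aLoop]]
            rw [ih rest hrest full start (i + 1) '}' (c1 :: cs) (Or.inr rfl) hall]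
            conv_rhs => rw [parseB.eq_def]
            simp only [if_neg hc1q, Char.reduceEq, or_self, if_false, if_true]
            cases hp : parseB '}' rest with
            | none => simp
            | some rp =>
              obtain ⟨r, hr⟩ := rp
              simp only
              rw [ih r (by omega) full start _ c1 cs hc1 hcs]
              cases hp2 : parseB c1 r with
              | none => simp
              | some rp2 =>
                obtain ⟨r2, hr2⟩ := rp2
                simp only
                cases cs with
                | nil => simp only; congr 2; simp; omega
                | cons a as => simp only; congr 1; simp; omega
        · by_cases hcl : c = '}' ∨ c = ']'
          · by_cases hceq : c = c1
            · subst hceq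
              conv_rhs => rw [parseB.eq_def]
              simp only [if_neg hq, reduceIte]
              have stepA : aLoop full start i (c :: rest) (c :: cs) false false =
                  (if cs = [] then some (pvSlice full start (i + 1))
                   else aLoop full start (i + 1) rest cs false false) := by
                rcases hcl with rfl | rfl <;> simp [aLoop]
              rw [stepA]
              cases cs with
              | nil => simp only [reduceIte]; congr 2; simp
              | cons a as =>
                simp only [if_neg (by simp : ¬ (a :: as) = ([] : List Char))]
                congr 1
                simp
            · have hc1c : ¬ c1 = c := fun h => hceq h.symm
              have stepA : aLoop full start i (c :: rest) (c1 :: cs) false false = none := by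
                rcases hcl with rfl | rfl <;> simp [aLoop, hc1c]
              rw [stepA]
              conv_rhs => rw [parseB.eq_def]
              simp only [if_neg hq, if_neg hceq, if_pos hcl]
          · have stepA : aLoop full start i (c :: rest) (c1 :: cs) false false =
                aLoop full start (i + 1) rest (c1 :: cs) false false := by
              simp [aLoop, hq, hop, hcl]
            have hceq : ¬ (c = c1) := by rcases hc1 with rfl | rfl <;> simp_all
            rw [stepA, ih rest hrest full start (i + 1) c1 cs hc1 hcs]
            conv_rhs => rw [parseB.eq_def]
            have h1 : ¬ c = '[' := fun h => hop (Or.inl h)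
            have h2 : ¬ c = '{' := fun h => hop (Or.inr h)
            simp only [if_neg hq, if_neg hceq, if_neg hcl, if_neg h1, if_neg h2]
            cases hp : parseB c1 rest with
            | none => simp
            | some rp =>
              obtain ⟨r, hr⟩ := rp
              simp only
              cases cs with
              | nil => simp only; congr 2; simp; omega
              | cons a as => simp only; congr 1; simp; omega

-- prescan + loop of A = bFind of B, along the suffixes of chars.
lemma find_eq : ∀ (chars rem : List Char) (i : Nat), rem = chars.drop i →
    (match aFind rem i with
     | none => none
     | some s => aLoop chars s s (chars.drop s) [] false false) = bFind chars rem i := by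
  intro chars rem
  induction rem with
  | nil => intro i _; simp [aFind, bFind]
  | cons c rest ihr =>
    intro i hdrop
    have hlen : rest.length + 1 = chars.length - i := by
      have := congrArg List.length hdrop
      simpa using this
    have hrest : rest = chars.drop (i + 1) := by
      have h1 : chars.drop (i + 1) = (chars.drop i).drop 1 := by
        rw [List.drop_drop]
      rw [h1, ← hdrop]
      simp
    by_cases h1 : c = '['
    · subst h1
      rw [show aFind ('[' :: rest) i = some i from by simp [aFind]]
      simp only
      rw [← hdrop]
      rw [show aLoop chars i i ('[' :: rest) [] false false =
          aLoop chars i (i + 1) rest [']'] false false from by simp [aLoop]]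
      rw [aLoop_parse rest.length rest le_rfl chars i (i + 1) ']' [] (Or.inl rfl)
        (by simp)]
      rw [show bFind chars ('[' :: rest) i =
          (match parseB ']' rest with
           | none => none
           | some ⟨r, _⟩ => some (pvSlice chars i (chars.length - r.length))) from by
        rw [bFind.eq_def]; simp]
      cases hp : parseB ']' rest with
      | none => simp
      | some rp =>
        obtain ⟨r, hr⟩ := rp
        simp only
        congr 2
        omega
    · by_cases h2 : c = '{'
      · subst h2
        rw [show aFind ('{' :: rest) i = some i from by simp [aFind]]
        simp only
        rw [← hdrop]
        rw [show aLoop chars i i ('{' :: rest) [] false false =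
            aLoop chars i (i + 1) rest ['}'] false false from by simp [aLoop]]
        rw [aLoop_parse rest.length rest le_rfl chars i (i + 1) '}' [] (Or.inr rfl)
          (by simp)]
        rw [show bFind chars ('{' :: rest) i =
            (match parseB '}' rest with
             | none => none
             | some ⟨r, _⟩ => some (pvSlice chars i (chars.length - r.length))) from by
          rw [bFind.eq_def]; simp]
        cases hp : parseB '}' rest with
        | none => simp
        | some rp =>
          obtain ⟨r, hr⟩ := rp
          simp only
          congr 2
          omega
      · rw [show aFind (c :: rest) i = aFind rest (i + 1) from by
          simp [aFind, h1, h2]]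
        rw [show bFind chars (c :: rest) i = bFind chars rest (i + 1) from by
          rw [bFind.eq_def]; simp [h1, h2]]
        exact ihr (i + 1) hrest

-- ===== VERDICT (by name: the statement is the Claim_ definition above) =====
theorem extract_balanced_json_container_py_spec : Claim_equal_extract_balanced_json_container_py := by
  intro text _
  unfold Spec_extract_balanced_json_container_py extract_balanced_json_container_py
    extract_balanced_json_container_py_alt
  exact find_eq text.toList text.toList 0 rfl
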